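-- pv_equiv track=rewrite | github.com/shreypatel703/Get-A-Wai | cities_server/cities/api/api.py | filter_trip_duration
-- ===== SOURCE A (Python) =====
-- def filter_trip_duration(string_duration):
--     word_list = string_duration.split()
--     extracted_num = 1
--     multiplier = 1
--     is_day = 0
--     for word in word_list:
--         if word.isnumeric():
--             extracted_num = int(word)
--         if word.strip().lower() == "week" or word.strip().lower() == "weeks" :
--             multiplier = 7
--         if word.strip().lower() == "month" or word.strip().lower() == "months":
--             multiplier = 30
--         if word.strip().lower() == "day" or word.strip().lower() == "days":
--             is_day = 1
--
--     return (extracted_num - is_day) * multiplier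
-- ===== SOURCE B (Python) =====
-- def filter_trip_duration(string_duration):
--     words = string_duration.split()
--     num = 1
--     for w in reversed(words):
--         if w.isnumeric():
--             num = int(w)
--             break
--     mult = 1
--     for w in reversed(words):
--         lw = w.lower()
--         if lw in ("week", "weeks"):
--             mult = 7
--             break
--         if lw in ("month", "months"):
--             mult = 30
--             break
--     day = 1 if any(w.lower() in ("day", "days") for w in words) else 0
--     return (num - day) * mult
-- ===== Notes on version B (the rewrite author's own statement) =====
-- stated objective: alternative
-- what changed: A's single forward loop threading a three-field accumulator is replaced by independent back-to-front scans with early exit (last numeric word, last week/month word) plus a membership test for day/days.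
import Mathlib
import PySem

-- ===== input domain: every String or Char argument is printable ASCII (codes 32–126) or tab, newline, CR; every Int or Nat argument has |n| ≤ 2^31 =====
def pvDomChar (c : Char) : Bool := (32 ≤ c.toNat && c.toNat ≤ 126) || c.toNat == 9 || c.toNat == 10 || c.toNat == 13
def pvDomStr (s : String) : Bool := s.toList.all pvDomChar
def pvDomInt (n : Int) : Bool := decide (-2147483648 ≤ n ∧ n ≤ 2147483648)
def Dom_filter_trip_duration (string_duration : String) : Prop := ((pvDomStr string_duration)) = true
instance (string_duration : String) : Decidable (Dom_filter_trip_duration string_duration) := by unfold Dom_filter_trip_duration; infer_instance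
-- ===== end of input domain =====

-- B replaces A's single forward accumulator loop by independent back-to-front searches
-- (last numeric word, last week/month word) plus a membership test for day/days: alternative decomposition.

-- ===== PORT A =====
-- word.isnumeric() ported as PySem.Str.strIsdigit: exact on the printable-ASCII domain, where
-- isnumeric and isdigit coincide.  int(word) ported as (PySem.Int.ofStr? word).getD 0: the
-- branch guarantees word is a nonempty digit string, so ofStr? is never none there.
def filter_trip_duration (string_duration : String) : Int :=
  let word_list := PySem.Str.split₀ string_duration
  let st := word_list.foldl (fun (st : Int × Int × Int) word =>
    let extracted_num := if PySem.Str.strIsdigit word then (PySem.Int.ofStr? word).getD 0 else st.1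
    let lw := PySem.Str.lower (PySem.Str.strip word)
    let m1 := if lw = "week" ∨ lw = "weeks" then 7 else st.2.1
    let m2 := if lw = "month" ∨ lw = "months" then 30 else m1
    let is_day := if lw = "day" ∨ lw = "days" then 1 else st.2.2
    (extracted_num, m2, is_day)) (1, 1, 0)
  (st.1 - st.2.2) * st.2.1

-- ===== PORT B =====
-- first numeric word of the reversed word list (isnumeric/int ported as in port A)
def pvLastNum : List String → Int
  | [] => 1
  | w :: rs => if PySem.Str.strIsdigit w then (PySem.Int.ofStr? w).getD 0 else pvLastNum rs

-- first week/month word of the reversed word list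
def pvLastMult : List String → Int
  | [] => 1
  | w :: rs =>
    let lw := PySem.Str.lower w
    if lw = "week" ∨ lw = "weeks" then 7
    else if lw = "month" ∨ lw = "months" then 30
    else pvLastMult rs

def pvHasDay (ws : List String) : Bool :=
  ws.any (fun w => let lw := PySem.Str.lower w; decide (lw = "day" ∨ lw = "days"))

def filter_trip_duration_alt (string_duration : String) : Int :=
  let words := PySem.Str.split₀ string_duration
  let num := pvLastNum words.reverse
  let mult := pvLastMult words.reverse
  let day : Int := if pvHasDay words then 1 else 0
  (num - day) * mult

-- ===== PRECONDITION & SPEC =====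
def Spec_filter_trip_duration (string_duration : String) (out : Int) : Prop := out = filter_trip_duration_alt string_duration
instance (string_duration : String) (out : Int) : Decidable (Spec_filter_trip_duration string_duration out) := by unfold Spec_filter_trip_duration; infer_instance

-- ===== CLAIM (what is proved, stated in full; the proofs are below) =====
def Claim_equal_filter_trip_duration : Prop := ∀ (string_duration : String), Dom_filter_trip_duration string_duration → Spec_filter_trip_duration string_duration (filter_trip_duration string_duration)

-- ===== LEMMAS AND PROOFS =====

-- a word contains no whitespace character
def pvNoSpace (w : String) : Bool := w.toList.all (fun c => !PySem.Chars.isspace c)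

-- every word produced by str.split() is whitespace-free (invariant of split₀.go)
theorem pvGo_nospace (s cur : List Char) (acc : List (List Char))
    (hcur : cur.all (fun c => !PySem.Chars.isspace c) = true)
    (hacc : ∀ w ∈ acc, w.all (fun c => !PySem.Chars.isspace c) = true) :
    ∀ w ∈ PySem.Chars.split₀.go s cur acc, w.all (fun c => !PySem.Chars.isspace c) = true := by
  induction s generalizing cur acc with
  | nil =>
    intro w hw
    simp only [PySem.Chars.split₀.go] at hw
    split at hw
    · exact hacc w (by simpa using hw)
    · simp only [List.mem_reverse, List.mem_cons] at hw
      rcases hw with h | h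
      · subst h; simpa using hcur
      · exact hacc w h
  | cons c rest ih =>
    intro w hw
    simp only [PySem.Chars.split₀.go] at hw
    by_cases hsp : PySem.Chars.isspace c = true
    · simp only [hsp, if_true] at hw
      split at hw
      · exact ih [] acc (by simp) hacc w hw
      · refine ih [] (cur.reverse :: acc) (by simp) ?_ w hw
        intro v hv
        rcases List.mem_cons.mp hv with hv | hv
        · subst hv; simpa using hcur
        · exact hacc v hv
    · simp only [hsp, if_false, Bool.false_eq_true] at hw
      refine ih (c :: cur) acc ?_ hacc w hw
      simp only [List.all_cons, hcur, Bool.and_true, Bool.not_eq_eq_eq_not, Bool.not_true]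
      simpa using hsp

theorem pvSplit_nospace (s : String) : ∀ w ∈ PySem.Str.split₀ s, pvNoSpace w = true := by
  intro w hw
  simp only [PySem.Str.split₀, List.mem_map] at hw
  obtain ⟨cs, hcs, rfl⟩ := hw
  have := pvGo_nospace s.toList [] [] (by simp) (by simp) cs
    (by simpa [PySem.Chars.split₀] using hcs)
  simpa [pvNoSpace] using this

theorem pvStrip_of_nospace (w : String) (h : pvNoSpace w = true) :
    PySem.Str.strip w = w := by
  apply String.toList_injective
  rw [PySem.Str.toList_strip]
  simp only [pvNoSpace, List.all_eq_true, Bool.not_eq_eq_eq_not, Bool.not_true] at h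
  have hl : PySem.Chars.lstrip w.toList = w.toList := by
    simp only [PySem.Chars.lstrip]
    apply List.dropWhile_eq_self_iff.mpr
    cases hw : w.toList with
    | nil => simp
    | cons c t => simpa using h c (by simp [hw])
  have hr : PySem.Chars.rstrip w.toList = w.toList := by
    simp only [PySem.Chars.rstrip]
    rw [show List.dropWhile PySem.Chars.isspace w.toList.reverse = w.toList.reverse from ?_]
    · simp
    · apply List.dropWhile_eq_self_iff.mpr
      cases hw : w.toList.reverse with
      | nil => simp
      | cons c t =>
        have : c ∈ w.toList := by
          rw [← List.mem_reverse, hw]; simp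
        simpa using h c this
  simp [PySem.Chars.strip, hl, hr]

-- generalized reverse-scan helpers (default value as parameter), for the loop invariant
def pvLastNumD : List String → Int → Int
  | [], d => d
  | w :: rs, d => if PySem.Str.strIsdigit w then (PySem.Int.ofStr? w).getD 0 else pvLastNumD rs d

def pvLastMultD : List String → Int → Int
  | [], d => d
  | w :: rs, d =>
    let lw := PySem.Str.lower w
    if lw = "week" ∨ lw = "weeks" then 7
    else if lw = "month" ∨ lw = "months" then 30
    else pvLastMultD rs d

theorem pvLastNumD_one (rs : List String) : pvLastNumD rs 1 = pvLastNum rs := by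
  induction rs with
  | nil => rfl
  | cons w rs ih => simp [pvLastNumD, pvLastNum, ih]

theorem pvLastMultD_one (rs : List String) : pvLastMultD rs 1 = pvLastMult rs := by
  induction rs with
  | nil => rfl
  | cons w rs ih => simp only [pvLastMultD, pvLastMult, ih]

theorem pvLastNumD_append (rs : List String) (w : String) (d : Int) :
    pvLastNumD (rs ++ [w]) d
      = pvLastNumD rs (if PySem.Str.strIsdigit w then (PySem.Int.ofStr? w).getD 0 else d) := by
  induction rs with
  | nil => rfl
  | cons v rs ih => simp only [List.cons_append, pvLastNumD, ih]

theorem pvLastMultD_append (rs : List String) (w : String) (d : Int) :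
    pvLastMultD (rs ++ [w]) d
      = pvLastMultD rs
          (let lw := PySem.Str.lower w
           if lw = "week" ∨ lw = "weeks" then 7
           else if lw = "month" ∨ lw = "months" then 30 else d) := by
  induction rs with
  | nil => rfl
  | cons v rs ih => simp only [List.cons_append, pvLastMultD, ih]

-- the two multiplier tests are mutually exclusive, so their order is irrelevant
theorem pvMultSwap (lw : String) (m0 : Int) :
    (if lw = "month" ∨ lw = "months" then 30
     else if lw = "week" ∨ lw = "weeks" then 7 else m0)
      = (if lw = "week" ∨ lw = "weeks" then (7 : Int)
         else if lw = "month" ∨ lw = "months" then 30 else m0) := by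
  by_cases h1 : lw = "week" ∨ lw = "weeks"
  · have h2 : ¬ (lw = "month" ∨ lw = "months") := by rcases h1 with rfl | rfl <;> simp
    simp [h1, h2]
  · simp [h1]

-- A's loop body
def pvStepA (st : Int × Int × Int) (word : String) : Int × Int × Int :=
  let extracted_num := if PySem.Str.strIsdigit word then (PySem.Int.ofStr? word).getD 0 else st.1
  let lw := PySem.Str.lower (PySem.Str.strip word)
  let m1 := if lw = "week" ∨ lw = "weeks" then 7 else st.2.1
  let m2 := if lw = "month" ∨ lw = "months" then 30 else m1
  let is_day := if lw = "day" ∨ lw = "days" then 1 else st.2.2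
  (extracted_num, m2, is_day)

-- the invariant: A's forward fold computes B's three reverse-scan quantities
theorem pvFold_eq (ws : List String) (hns : ∀ w ∈ ws, pvNoSpace w = true)
    (n0 m0 d0 : Int) :
    ws.foldl pvStepA (n0, m0, d0)
      = (pvLastNumD ws.reverse n0, pvLastMultD ws.reverse m0,
         if pvHasDay ws then 1 else d0) := by
  induction ws generalizing n0 m0 d0 with
  | nil => simp [pvLastNumD, pvLastMultD, pvHasDay]
  | cons w ws ih =>
    have hw : PySem.Str.strip w = w := pvStrip_of_nospace w (hns w (by simp))
    have htail : ∀ v ∈ ws, pvNoSpace v = true := fun v hv => hns v (by simp [hv])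
    rw [List.foldl_cons, ih htail]
    simp only [pvStepA, hw, List.reverse_cons, pvLastNumD_append, pvLastMultD_append]
    simp only [Prod.mk.injEq]
    refine ⟨by trivial, congrArg (pvLastMultD ws.reverse) (pvMultSwap (PySem.Str.lower w) m0), ?_⟩
    have : pvHasDay (w :: ws)
        = ((decide (PySem.Str.lower w = "day" ∨ PySem.Str.lower w = "days")) || pvHasDay ws) := by
      simp [pvHasDay]
    rw [this]
    by_cases hd : pvHasDay ws = true
    · simp [hd]
    · simp only [Bool.not_eq_true] at hd
      simp only [hd, Bool.or_false]
      by_cases hday : PySem.Str.lower w = "day" ∨ PySem.Str.lower w = "days"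
      · simp [hday]
      · simp [hday]

-- ===== VERDICT (by name: the statement is the Claim_ definition above) =====
theorem filter_trip_duration_spec : Claim_equal_filter_trip_duration := by
  intro s _
  unfold Spec_filter_trip_duration filter_trip_duration filter_trip_duration_alt
  have h := pvFold_eq (PySem.Str.split₀ s) (pvSplit_nospace s) 1 1 0
  simp only [show (fun (st : Int × Int × Int) word =>
      let extracted_num := if PySem.Str.strIsdigit word then (PySem.Int.ofStr? word).getD 0 else st.1
      let lw := PySem.Str.lower (PySem.Str.strip word)
      let m1 := if lw = "week" ∨ lw = "weeks" then 7 else st.2.1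
      let m2 := if lw = "month" ∨ lw = "months" then 30 else m1
      let is_day := if lw = "day" ∨ lw = "days" then 1 else st.2.2
      (extracted_num, m2, is_day)) = pvStepA from rfl]
  rw [h, pvLastNumD_one, pvLastMultD_one]
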